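-- pv_equiv track=rewrite | github.com/erlin99/dsc80-projects | Project01/project01.py | submitted_by_TA
-- ===== SOURCE A (Python) =====
-- def submitted_by_TA(s):
--     pm = 72000
--     am = 28800
--     day = 86400
--
--     if s > 0 and s < 60:
--         return True
--
--     for i in range(15):
--         if am <= s and s <= pm:
--             return True
--         am += day
--         pm += day
--
--     return False
-- ===== SOURCE B (Python) =====
-- def submitted_by_TA(s):
--     if s > 0 and s < 60:
--         return True
--     d = s - 28800
--     return d >= 0 and d % 86400 <= 43200 and d // 86400 <= 14
-- ===== Notes on version B (the rewrite author's own statement) =====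
-- stated objective: simpler
-- what changed: The fifteen-iteration loop maintaining shifting am/pm bounds is replaced by a closed-form test on the offset from the first interval start using one floor division and one remainder.
import Mathlib
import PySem

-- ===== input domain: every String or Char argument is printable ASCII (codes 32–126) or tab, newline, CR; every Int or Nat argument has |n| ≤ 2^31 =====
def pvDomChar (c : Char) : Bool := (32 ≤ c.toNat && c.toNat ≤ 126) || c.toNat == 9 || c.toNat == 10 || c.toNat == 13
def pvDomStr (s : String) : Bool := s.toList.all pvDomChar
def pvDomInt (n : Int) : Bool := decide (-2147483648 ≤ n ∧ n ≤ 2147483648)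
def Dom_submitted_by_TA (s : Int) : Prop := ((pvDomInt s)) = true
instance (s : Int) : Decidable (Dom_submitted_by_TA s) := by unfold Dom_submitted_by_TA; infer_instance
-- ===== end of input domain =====

-- B replaces A's shifting-window loop by a closed-form divmod test on the offset from the first interval start (simpler).

-- ===== PORT A =====
-- the for-loop over range(15) with mutable am/pm and an early `return True`
def pvLoopA (s am pm : Int) : List Int → Bool
  | [] => false
  | _ :: rest => if am ≤ s ∧ s ≤ pm then true else pvLoopA s (am + 86400) (pm + 86400) rest

def submitted_by_TA (s : Int) : Bool :=
  if s > 0 ∧ s < 60 then true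
  else pvLoopA s 28800 72000 (PySem.List.pyRange 0 15 1)

-- ===== PORT B =====
def submitted_by_TA_alt (s : Int) : Bool :=
  if s > 0 ∧ s < 60 then true
  else
    let d := s - 28800
    decide (d ≥ 0) && decide (PySem.Int.mod d 86400 ≤ 43200) && decide (PySem.Int.floordiv d 86400 ≤ 14)

-- ===== PRECONDITION & SPEC =====
def Spec_submitted_by_TA (s : Int) (out : Bool) : Prop := out = submitted_by_TA_alt s
instance (s : Int) (out : Bool) : Decidable (Spec_submitted_by_TA s out) := by unfold Spec_submitted_by_TA; infer_instance

-- ===== CLAIM (what is proved, stated in full; the proofs are below) =====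
def Claim_equal_submitted_by_TA : Prop := ∀ (s : Int), Dom_submitted_by_TA s → Spec_submitted_by_TA s (submitted_by_TA s)

-- ===== LEMMAS AND PROOFS =====
theorem pvRange15 : PySem.List.pyRange 0 15 1 = [0,1,2,3,4,5,6,7,8,9,10,11,12,13,14] := by decide

-- ===== VERDICT (by name: the statement is the Claim_ definition above) =====
theorem submitted_by_TA_spec : Claim_equal_submitted_by_TA := by
  intro s _
  unfold Spec_submitted_by_TA
  simp only [submitted_by_TA, submitted_by_TA_alt, pvRange15]
  rw [PySem.Int.mod_eq_emod_of_pos (by norm_num : (0:Int) < 86400),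
      PySem.Int.floordiv_eq_ediv_of_pos (by norm_num : (0:Int) < 86400)]
  rw [Bool.eq_iff_iff]
  simp [pvLoopA]
  omega
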